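-- pv_equiv track=rewrite | github.com/StateFromJakeFarm/compProgramming | Factual/food_tastes.py | solution
-- ===== SOURCE A (Python) =====
-- def solution(inputTable):
--     # Get unique city names and food foods and sum different food
--     # foods for each city
--     cities = []
--     foods = []
--     data = {}
--     for row in inputTable:
--         city, food, num = row
--
--         cities.append(city)
--         foods.append(food)
--
--         num = int(num)
--         if city not in data:
--             data[city] = {food: num}
--         elif food not in data[city]:
--             data[city][food] = num
--         else:
--             data[city][food] += num
--
--     # Use unique city and food names in lexicographical order
--     cities = sorted(set(cities))
--     foods = sorted(set(foods))
--
--     # Convert to 2-D list data structure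
--     output = []
--     for city in cities:
--         row = []
--         for food in foods:
--             if food in data[city]:
--                 row.append(data[city][food])
--             else:
--                 row.append(0)
--
--         output.append(row)
--
--     return output
-- ===== SOURCE B (Python) =====
-- def solution(inputTable):
--     cities = sorted({row[0] for row in inputTable})
--     foods = sorted({row[1] for row in inputTable})
--     return [[sum(int(num) for c, f, num in inputTable if c == city and f == food)
--              for food in foods]
--             for city in cities]
-- ===== Notes on version B (the rewrite author's own statement) =====
-- stated objective: simpler
-- what changed: B drops A's nested dict-of-dicts aggregation and the project-by-lookup double loop: it sorts the distinct cities and foods and computes each matrix cell directly as a sum of int(num) over the rows matching that (city, food) pair.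
import Mathlib
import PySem

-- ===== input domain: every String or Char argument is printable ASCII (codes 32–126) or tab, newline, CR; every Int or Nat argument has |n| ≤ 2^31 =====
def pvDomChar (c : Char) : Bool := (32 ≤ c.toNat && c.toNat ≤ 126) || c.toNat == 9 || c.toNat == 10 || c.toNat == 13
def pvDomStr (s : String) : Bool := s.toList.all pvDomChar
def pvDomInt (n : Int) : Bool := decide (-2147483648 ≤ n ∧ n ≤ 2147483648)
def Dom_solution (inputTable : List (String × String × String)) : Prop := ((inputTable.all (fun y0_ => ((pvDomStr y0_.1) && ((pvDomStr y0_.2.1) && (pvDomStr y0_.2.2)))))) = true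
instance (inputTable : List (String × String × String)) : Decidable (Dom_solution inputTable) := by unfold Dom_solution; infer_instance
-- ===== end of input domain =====

-- B drops A's nested dict-of-dicts + project-by-lookup double loop: it sorts the distinct
-- cities/foods and computes each matrix cell directly as a sum over the matching rows (objective: simpler).

-- ===== PORT A =====
-- int(s); Pre_solution guarantees the parse succeeds (Python raises ValueError otherwise)
def pyInt (s : String) : Int := (PySem.Int.ofStr? s).getD 0

-- A's if/elif/else update of the nested dict `data` for one row
def dataStep (d : PySem.Dict String (PySem.Dict String Int)) (row : String × String × String) :
    PySem.Dict String (PySem.Dict String Int) :=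
  if d.contains row.1 = false then
    d.insert row.1 (PySem.Dict.empty.insert row.2.1 (pyInt row.2.2))
  else if ((d.get? row.1).getD PySem.Dict.empty).contains row.2.1 = false then
    -- data[row.1]: the key is present in this branch, so getD's default is never read
    d.insert row.1 (((d.get? row.1).getD PySem.Dict.empty).insert row.2.1 (pyInt row.2.2))
  else
    d.insert row.1 (((d.get? row.1).getD PySem.Dict.empty).insert row.2.1
      (((d.get? row.1).getD PySem.Dict.empty).getD row.2.1 0 + pyInt row.2.2))

-- the whole body of A's first loop (cities/foods appended, data updated)
def solutionStep
    (acc : List String × List String × PySem.Dict String (PySem.Dict String Int))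
    (row : String × String × String) :
    List String × List String × PySem.Dict String (PySem.Dict String Int) :=
  (acc.1 ++ [row.1], acc.2.1 ++ [row.2.1], dataStep acc.2.2 row)

def solution (inputTable : List (String × String × String)) : List (List Int) :=
  let st := inputTable.foldl solutionStep ([], [], PySem.Dict.empty)
  let cities := PySem.List.sorted (PySem.Set.ofList st.1) (fun x => x) false
  let foods := PySem.List.sorted (PySem.Set.ofList st.2.1) (fun x => x) false
  cities.foldl (fun output city =>
    let inner := (st.2.2.get? city).getD PySem.Dict.empty   -- data[city]; every listed city is a key
    output ++ [foods.foldl (fun row food =>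
      row ++ [if inner.contains food then inner.getD food 0 else 0]) []]) []

-- ===== PORT B =====
def solution_alt (inputTable : List (String × String × String)) : List (List Int) :=
  let cities := PySem.List.sorted (PySem.Set.ofList (inputTable.map (·.1))) (fun x => x) false
  let foods := PySem.List.sorted (PySem.Set.ofList (inputTable.map (·.2.1))) (fun x => x) false
  cities.map (fun city => foods.map (fun food =>
    inputTable.foldl (fun s r =>
      if r.1 == city && r.2.1 == food then s + pyInt r.2.2 else s) 0))

-- ===== PRECONDITION & SPEC =====
-- Pre_ excludes exactly the rows whose count string int() cannot parse: Python A (and B) raise ValueError there.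
def Pre_solution (inputTable : List (String × String × String)) : Prop :=
  ∀ r ∈ inputTable, (PySem.Int.ofStr? r.2.2).isSome = true
instance (inputTable : List (String × String × String)) : Decidable (Pre_solution inputTable) := by
  unfold Pre_solution; infer_instance

def pvWitness_solution : (List (String × String × String)) :=
  [("b", "x", "3"), ("a", "y", "+4"), ("a", "x", "-1"), ("a", "y", " 2 ")]

def Spec_solution (inputTable : List (String × String × String)) (out : List (List Int)) : Prop := out = solution_alt inputTable
instance (inputTable : List (String × String × String)) (out : List (List Int)) : Decidable (Spec_solution inputTable out) := by unfold Spec_solution; infer_instance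

-- ===== CLAIM (what is proved, stated in full; the proofs are below) =====
def Claim_equal_solution : Prop := ∀ (inputTable : List (String × String × String)), Dom_solution inputTable → Pre_solution inputTable → Spec_solution inputTable (solution inputTable)

-- ===== LEMMAS AND PROOFS =====

-- the value A's final projection reads for (c, f): data.get(c, {}).get(f, 0)
def lookup2 (d : PySem.Dict String (PySem.Dict String Int)) (c f : String) : Int :=
  ((d.get? c).getD PySem.Dict.empty).getD f 0

theorem lookup2_dataStep (d : PySem.Dict String (PySem.Dict String Int))
    (r : String × String × String) (c f : String) :
    lookup2 (dataStep d r) c f =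
      if r.1 = c ∧ r.2.1 = f then lookup2 d c f + pyInt r.2.2 else lookup2 d c f := by
  rcases r with ⟨rc, rf, rn⟩
  unfold lookup2 dataStep
  by_cases h1 : d.contains rc = false
  · have hg : d.get? rc = none := (PySem.Dict.get?_eq_none_iff_contains d rc).mpr h1
    rw [if_pos h1]
    by_cases hc : rc = c
    · subst hc
      by_cases hf : rf = f
      · subst hf; simp [PySem.Dict.get?_insert, hg, PySem.Dict.getD_insert]
      · have hf' : ¬ f = rf := fun h => hf h.symm
        simp [PySem.Dict.get?_insert, PySem.Dict.getD_insert, hg, hf, hf']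
    · have hc' : ¬ c = rc := fun h => hc h.symm
      simp [PySem.Dict.get?_insert, hc, hc']
  · rw [if_neg h1]
    by_cases h2 : ((d.get? rc).getD PySem.Dict.empty).contains rf = false
    · rw [if_pos h2]
      have hz : ((d.get? rc).getD PySem.Dict.empty).getD rf 0 = 0 :=
        PySem.Dict.getD_of_not_contains _ _ h2
      by_cases hc : rc = c
      · subst hc
        by_cases hf : rf = f
        · subst hf; simp [PySem.Dict.get?_insert, PySem.Dict.getD_insert, hz]
        · have hf' : ¬ f = rf := fun h => hf h.symm
          simp [PySem.Dict.get?_insert, PySem.Dict.getD_insert, hf, hf']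
      · have hc' : ¬ c = rc := fun h => hc h.symm
        simp [PySem.Dict.get?_insert, hc, hc']
    · rw [if_neg h2]
      by_cases hc : rc = c
      · subst hc
        by_cases hf : rf = f
        · subst hf; simp [PySem.Dict.get?_insert, PySem.Dict.getD_insert]
        · have hf' : ¬ f = rf := fun h => hf h.symm
          simp [PySem.Dict.get?_insert, PySem.Dict.getD_insert, hf, hf']
      · have hc' : ¬ c = rc := fun h => hc h.symm
        simp [PySem.Dict.get?_insert, hc, hc']

theorem lookup2_foldl (t : List (String × String × String))
    (d : PySem.Dict String (PySem.Dict String Int)) (c f : String) :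
    lookup2 (t.foldl dataStep d) c f =
      t.foldl (fun s r => if r.1 == c && r.2.1 == f then s + pyInt r.2.2 else s) (lookup2 d c f) := by
  induction t generalizing d with
  | nil => rfl
  | cons r t ih =>
      simp only [List.foldl_cons, ih, lookup2_dataStep]
      congr 1
      by_cases h1 : r.1 = c <;> by_cases h2 : r.2.1 = f <;> simp [h1, h2]

theorem fold_fst (t : List (String × String × String))
    (acc : List String × List String × PySem.Dict String (PySem.Dict String Int)) :
    (t.foldl solutionStep acc).1 = acc.1 ++ t.map (·.1) := by
  induction t generalizing acc with
  | nil => simp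
  | cons r t ih => simp [List.foldl_cons, ih, solutionStep]

theorem fold_snd1 (t : List (String × String × String))
    (acc : List String × List String × PySem.Dict String (PySem.Dict String Int)) :
    (t.foldl solutionStep acc).2.1 = acc.2.1 ++ t.map (·.2.1) := by
  induction t generalizing acc with
  | nil => simp
  | cons r t ih => simp [List.foldl_cons, ih, solutionStep]

theorem fold_snd2 (t : List (String × String × String))
    (acc : List String × List String × PySem.Dict String (PySem.Dict String Int)) :
    (t.foldl solutionStep acc).2.2 = t.foldl dataStep acc.2.2 := by
  induction t generalizing acc with
  | nil => rfl
  | cons r t ih => simp [List.foldl_cons, ih, solutionStep]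

-- A's cell expression is exactly lookup2 (the `else 0` branch agrees with the 0 default)
theorem cellA_eq_lookup2 (d : PySem.Dict String (PySem.Dict String Int)) (c f : String) :
    (if ((d.get? c).getD PySem.Dict.empty).contains f then
        ((d.get? c).getD PySem.Dict.empty).getD f 0 else 0) = lookup2 d c f := by
  unfold lookup2
  by_cases h : ((d.get? c).getD PySem.Dict.empty).contains f = true
  · simp [h]
  · simp only [Bool.not_eq_true] at h
    simp [h, PySem.Dict.getD_of_not_contains _ _ h]

-- ===== VERDICT (by name: the statement is the Claim_ definition above) =====
theorem solution_spec : Claim_equal_solution := by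
  intro t _ _
  unfold Spec_solution solution solution_alt
  simp only [fold_fst, fold_snd1, fold_snd2, List.nil_append,
    PySem.List.foldl_append_singleton_eq_map]
  refine congrArg₂ _ ?_ rfl
  funext city
  refine congrArg₂ _ ?_ rfl
  funext food
  rw [cellA_eq_lookup2, lookup2_foldl]
  simp [lookup2]
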